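-- pv_equiv track=rewrite | github.com/devakowakou/adventofcode | day12/solution.py | all_orientations
-- ===== SOURCE A (Python) =====
-- def normalize_cells(cells):
--     """Translate so min r,min c becomes (0,0) and return tuple sorted."""
--     if not cells:
--         return tuple()
--     minr = min(r for r,c in cells)
--     minc = min(c for r,c in cells)
--     norm = tuple(sorted(((r - minr, c - minc) for r,c in cells)))
--     return norm
--
-- def rotate_cells(cells):
--     """Rotate 90 degrees clockwise around origin on grid: (r,c) -> (c, -r) then normalize."""
--     # For integer grid it's simpler to map (r,c) -> (c, -r), but we'll then translate to positives.
--     rotated = [ (c, -r) for r,c in cells ]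
--     return normalize_cells(rotated)
--
-- def flip_cells(cells):
--     """Flip horizontally: (r,c) -> (r, -c) then normalize."""
--     flipped = [ (r, -c) for r,c in cells ]
--     return normalize_cells(flipped)
--
-- def all_orientations(cells):
--     """Return set of all unique orientations (rotations + flips) as normalized tuples."""
--     ori = set()
--     cur = normalize_cells(cells)
--     for _ in range(4):
--         cur = rotate_cells(cur)
--         ori.add(cur)
--         ori.add(flip_cells(cur))
--     # normalize each orientation to positive coordinates starting at 0
--     return sorted(ori)
-- ===== SOURCE B (Python) =====
-- def _ins_cell(p, lst):
--     """Insert pair p into a (lexicographically) sorted list, after equal elements."""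
--     if not lst:
--         return [p]
--     if p < lst[0]:
--         return [p] + lst
--     return [lst[0]] + _ins_cell(p, lst[1:])
--
-- def _norm(cells):
--     """Translate so min r, min c becomes (0,0); insertion-sort the shifted cells."""
--     if not cells:
--         return ()
--     mr, mc = cells[0]
--     for r, c in cells[1:]:
--         if r < mr:
--             mr = r
--         if c < mc:
--             mc = c
--     srt = []
--     for r, c in cells:
--         srt = _ins_cell((r - mr, c - mc), srt)
--     return tuple(srt)
--
-- def _add_ori(o, lst):
--     """Insert orientation o into a sorted duplicate-free list, skipping duplicates."""
--     if not lst: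
--         return [o]
--     if o == lst[0]:
--         return lst
--     if o < lst[0]:
--         return [o] + lst
--     return [lst[0]] + _add_ori(o, lst[1:])
--
-- def all_orientations(cells):
--     """Return set of all unique orientations (rotations + flips) as normalized tuples."""
--     out = []
--     for m in ((lambda r, c: (r, c)),
--               (lambda r, c: (c, -r)),
--               (lambda r, c: (-r, -c)),
--               (lambda r, c: (-c, r)),
--               (lambda r, c: (r, -c)),
--               (lambda r, c: (c, r)),
--               (lambda r, c: (-r, c)),
--               (lambda r, c: (-c, -r))):
--         out = _add_ori(_norm([m(r, c) for r, c in cells]), out)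
--     return out
-- ===== Notes on version B (the rewrite author's own statement) =====
-- stated objective: alternative
-- what changed: Replaces A's 4-step loop that incrementally rotates a carried-forward normalized shape (plus a flip each step) into a set that is sorted at the end, by a flat pass over the 8 explicit closed-form dihedral coordinate maps, normalizing each image with a hand-rolled one-pass minima scan and insertion sort, and maintaining the result directly as a sorted duplicate-free list via ordered insertion (no set(), min() or sorted()).
import Mathlib
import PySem

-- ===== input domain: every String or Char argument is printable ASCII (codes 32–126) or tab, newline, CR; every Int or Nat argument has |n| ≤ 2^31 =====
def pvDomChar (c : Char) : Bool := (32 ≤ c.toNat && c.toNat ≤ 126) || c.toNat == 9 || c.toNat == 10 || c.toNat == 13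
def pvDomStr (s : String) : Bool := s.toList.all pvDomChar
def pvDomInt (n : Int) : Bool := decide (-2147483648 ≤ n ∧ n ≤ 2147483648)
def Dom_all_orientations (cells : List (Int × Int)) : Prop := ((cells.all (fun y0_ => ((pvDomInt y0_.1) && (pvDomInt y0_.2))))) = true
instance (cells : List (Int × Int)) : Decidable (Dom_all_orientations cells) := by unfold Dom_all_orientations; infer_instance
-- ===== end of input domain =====

-- B replaces A's 4-step rotate-and-carry loop over a set by a flat pass over the 8
-- explicit closed-form dihedral maps, with hand-rolled one-pass minima, insertion
-- sort, and sorted-unique insertion instead of min()/sorted()/set (alternative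
-- decomposition, same cost).

-- Python compares tuples lexicographically; A's port sorts with the key below,
-- which flattens a pair / a list of pairs into a List Int — an order embedding of
-- Python's tuple order into the lexicographic order on List Int (exact).
def pvFlat (p : Int × Int) : List Int := [p.1, p.2]
def pvFlatL (l : List (Int × Int)) : List Int := l.flatMap pvFlat

-- ===== PORT A =====
def normalize_cells (cells : List (Int × Int)) : List (Int × Int) :=
  if cells = [] then []
  else
    match PySem.List.min? (cells.map (fun p => p.1)) (fun x => x),
          PySem.List.min? (cells.map (fun p => p.2)) (fun x => x) with
    | some minr, some minc =>
        PySem.List.sorted (cells.map (fun p => (p.1 - minr, p.2 - minc))) pvFlat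
    | _, _ => []  -- unreachable: cells ≠ []

def rotate_cells (cells : List (Int × Int)) : List (Int × Int) :=
  normalize_cells (cells.map (fun p => (p.2, -p.1)))

def flip_cells (cells : List (Int × Int)) : List (Int × Int) :=
  normalize_cells (cells.map (fun p => (p.1, -p.2)))

def all_orientations (cells : List (Int × Int)) : List (List (Int × Int)) :=
  let st := (PySem.List.pyRange 0 4 1).foldl
    (fun (st : List (Int × Int) × PySem.Set (List (Int × Int))) _ =>
      let cur := rotate_cells st.1
      (cur, PySem.Set.add (PySem.Set.add st.2 cur) (flip_cells cur)))
    (normalize_cells cells, PySem.Set.empty)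
  PySem.List.sorted st.2 pvFlatL

-- ===== PORT B =====
-- Python's '<' on (r, c) pairs (lexicographic), as Source B compares them
def pltC (p q : Int × Int) : Bool :=
  decide (p.1 < q.1) || (p.1 == q.1 && decide (p.2 < q.2))

-- _ins_cell: insert a pair into a sorted list, after equal elements
def insCell (p : Int × Int) : List (Int × Int) → List (Int × Int)
  | [] => [p]
  | q :: t => if pltC p q then p :: q :: t else q :: insCell p t

-- _norm: one-pass minima, then insertion-sort the shifted cells
def normB (cells : List (Int × Int)) : List (Int × Int) :=
  match cells with
  | [] => []
  | p0 :: rest =>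
    let m := rest.foldl
      (fun (m : Int × Int) p =>
        (if p.1 < m.1 then p.1 else m.1, if p.2 < m.2 then p.2 else m.2)) p0
    (p0 :: rest).foldl (fun srt p => insCell (p.1 - m.1, p.2 - m.2) srt) []

-- Python's '<' on tuples of pairs (lexicographic), as _add_ori compares them
def pltO : List (Int × Int) → List (Int × Int) → Bool
  | [], [] => false
  | [], _ :: _ => true
  | _ :: _, [] => false
  | p :: t, q :: u => pltC p q || (p == q && pltO t u)

-- _add_ori: insert into a sorted duplicate-free list, skipping duplicates
def addOri (o : List (Int × Int)) : List (List (Int × Int)) → List (List (Int × Int))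
  | [] => [o]
  | x :: t => if o = x then x :: t else if pltO o x then o :: x :: t else x :: addOri o t

def pvMaps : List ((Int × Int) → (Int × Int)) :=
  [ fun p => (p.1, p.2),
    fun p => (p.2, -p.1),
    fun p => (-p.1, -p.2),
    fun p => (-p.2, p.1),
    fun p => (p.1, -p.2),
    fun p => (p.2, p.1),
    fun p => (-p.1, p.2),
    fun p => (-p.2, -p.1) ]

def all_orientations_alt (cells : List (Int × Int)) : List (List (Int × Int)) :=
  pvMaps.foldl (fun out m => addOri (normB (cells.map m)) out) []

-- ===== PRECONDITION & SPEC =====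
def Spec_all_orientations (cells : List (Int × Int)) (out : List (List (Int × Int))) : Prop := out = all_orientations_alt cells
instance (cells : List (Int × Int)) (out : List (List (Int × Int))) : Decidable (Spec_all_orientations cells out) := by unfold Spec_all_orientations; infer_instance

-- ===== CLAIM (what is proved, stated in full; the proofs are below) =====
def Claim_equal_all_orientations : Prop := ∀ (cells : List (Int × Int)), Dom_all_orientations cells → Spec_all_orientations cells (all_orientations cells)

-- ===== LEMMAS AND PROOFS =====

theorem pv_sorted_perm_eq {α : Type} (xs ys : List α) (key : α → List Int)
    (hinj : Function.Injective key) (hp : xs.Perm ys) :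
    @PySem.List.sorted α (List Int) List.instLT (fun a b => a.decidableLT b) xs key false
      = @PySem.List.sorted α (List Int) List.instLT (fun a b => a.decidableLT b) ys key false := by
  have h := PySem.List.sorted_eq_sorted_of_perm xs ys key hinj hp
  have e : (fun (a b : List Int) => a.decidableLT b) = (LinearOrder.toDecidableLT (α := List Int)) := by
    funext a b; exact Subsingleton.elim _ _
  rw [e]
  exact h

theorem pvFlat_inj : Function.Injective pvFlat := by
  intro p q h
  simp [pvFlat] at h
  exact Prod.ext h.1 h.2

theorem pvFlatL_inj : Function.Injective pvFlatL := by
  intro l1 l2 h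
  induction l1 generalizing l2 with
  | nil =>
      cases l2 with
      | nil => rfl
      | cons q t => simp [pvFlatL, pvFlat] at h
  | cons p t ih =>
      cases l2 with
      | nil => simp [pvFlatL, pvFlat] at h
      | cons q t2 =>
          simp [pvFlatL, pvFlat] at h
          obtain ⟨h1, h2, h3⟩ := h
          have ht := ih (l2 := t2) (by simpa [pvFlatL] using h3)
          simp [ht, Prod.ext_iff, h1, h2]

-- value of min over an Int list is permutation-invariant
theorem min?_id_perm {xs ys : List Int} (h : xs.Perm ys) :
    PySem.List.min? xs (fun x => x) = PySem.List.min? ys (fun x => x) := by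
  cases hx : PySem.List.min? xs (fun x => x) with
  | none =>
      have hxe : xs = [] := (PySem.List.min?_eq_none_iff _ _).1 hx
      subst hxe
      have hye : ys = [] := h.symm.eq_nil
      subst hye
      rfl
  | some m =>
      cases hy : PySem.List.min? ys (fun x => x) with
      | none =>
          have hye : ys = [] := (PySem.List.min?_eq_none_iff _ _).1 hy
          subst hye
          have hxe : xs = [] := h.eq_nil
          subst hxe
          simp [PySem.List.min?] at hx
      | some m' =>
          have hm : m ∈ xs := PySem.List.min?_mem hx
          have hm' : m' ∈ ys := PySem.List.min?_mem hy
          have h1 : m ≤ m' := PySem.List.min?_isMin hx m' (h.mem_iff.2 hm')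
          have h2 : m' ≤ m := PySem.List.min?_isMin hy m (h.mem_iff.1 hm)
          simp [le_antisymm h1 h2]

theorem norm_eq_sorted {xs : List (Int × Int)} {minr minc : Int} (hx : xs ≠ [])
    (hr : PySem.List.min? (xs.map (fun p => p.1)) (fun x => x) = some minr)
    (hc : PySem.List.min? (xs.map (fun p => p.2)) (fun x => x) = some minc) :
    normalize_cells xs = PySem.List.sorted (xs.map (fun p => (p.1 - minr, p.2 - minc))) pvFlat := by
  unfold normalize_cells
  rw [if_neg hx, hr, hc]

theorem norm_perm {xs ys : List (Int × Int)} (h : xs.Perm ys) :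
    normalize_cells xs = normalize_cells ys := by
  by_cases hx : xs = []
  · subst hx
    have hye : ys = [] := h.symm.eq_nil
    subst hye
    rfl
  · have hy : ys ≠ [] := fun hye => hx (hye ▸ h).eq_nil
    cases hr : PySem.List.min? (ys.map (fun p => p.1)) (fun x => x) with
    | none => exact absurd (by simpa using (PySem.List.min?_eq_none_iff _ _).1 hr) hy
    | some minr =>
      cases hc : PySem.List.min? (ys.map (fun p => p.2)) (fun x => x) with
      | none => exact absurd (by simpa using (PySem.List.min?_eq_none_iff _ _).1 hc) hy
      | some minc =>
        rw [norm_eq_sorted hy hr hc,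
            norm_eq_sorted hx ((min?_id_perm (h.map (fun p => p.1))).trans hr)
              ((min?_id_perm (h.map (fun p => p.2))).trans hc)]
        exact pv_sorted_perm_eq _ _ pvFlat pvFlat_inj
          (h.map (fun p => (p.1 - minr, p.2 - minc)))

-- min over a shifted list shifts
theorem min?_id_map_add (u : Int) (l : List Int) :
    PySem.List.min? (l.map (fun x => x + u)) (fun x => x)
      = (PySem.List.min? l (fun x => x)).map (fun x => x + u) := by
  cases l with
  | nil => rfl
  | cons x t =>
      rw [List.map_cons, PySem.List.min?_id_cons, PySem.List.min?_id_cons]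
      simp only [Option.map_some]
      congr 1
      induction t generalizing x with
      | nil => simp
      | cons y t ih =>
          simp only [List.map_cons, List.foldl_cons]
          rw [min_add_add_right]
          exact ih (min x y)

theorem norm_translate (u v : Int) (xs : List (Int × Int)) :
    normalize_cells (xs.map (fun p => (p.1 + u, p.2 + v))) = normalize_cells xs := by
  by_cases hx : xs = []
  · subst hx; rfl
  · have hx' : xs.map (fun p => (p.1 + u, p.2 + v)) ≠ [] := by simpa using hx
    cases hr : PySem.List.min? (xs.map (fun p => p.1)) (fun x => x) with
    | none => exact absurd (by simpa using (PySem.List.min?_eq_none_iff _ _).1 hr) hx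
    | some minr =>
      cases hc : PySem.List.min? (xs.map (fun p => p.2)) (fun x => x) with
      | none => exact absurd (by simpa using (PySem.List.min?_eq_none_iff _ _).1 hc) hx
      | some minc =>
        have hr' : PySem.List.min? ((xs.map (fun p => (p.1 + u, p.2 + v))).map (fun p => p.1)) (fun x => x)
            = some (minr + u) := by
          have e1 : (xs.map (fun p => (p.1 + u, p.2 + v))).map (fun p => p.1)
              = (xs.map (fun p => p.1)).map (fun x => x + u) := by simp [List.map_map]
          rw [e1, min?_id_map_add, hr]; rfl
        have hc' : PySem.List.min? ((xs.map (fun p => (p.1 + u, p.2 + v))).map (fun p => p.2)) (fun x => x)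
            = some (minc + v) := by
          have e2 : (xs.map (fun p => (p.1 + u, p.2 + v))).map (fun p => p.2)
              = (xs.map (fun p => p.2)).map (fun x => x + v) := by simp [List.map_map]
          rw [e2, min?_id_map_add, hc]; rfl
        rw [norm_eq_sorted hx hr hc, norm_eq_sorted hx' hr' hc']
        congr 1
        simp only [List.map_map]
        apply List.map_congr_left
        intro p _
        simp only [Function.comp]
        rw [Prod.mk.injEq]
        constructor <;> ring

-- normalizing first does not change the normalized image under a linear map
theorem norm_map_norm (a b c d : Int) (xs : List (Int × Int)) :
    normalize_cells ((normalize_cells xs).map (fun p => (a*p.1 + b*p.2, c*p.1 + d*p.2)))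
      = normalize_cells (xs.map (fun p => (a*p.1 + b*p.2, c*p.1 + d*p.2))) := by
  by_cases hx : xs = []
  · subst hx; rfl
  · cases hr : PySem.List.min? (xs.map (fun p => p.1)) (fun x => x) with
    | none => exact absurd (by simpa using (PySem.List.min?_eq_none_iff _ _).1 hr) hx
    | some minr =>
      cases hc : PySem.List.min? (xs.map (fun p => p.2)) (fun x => x) with
      | none => exact absurd (by simpa using (PySem.List.min?_eq_none_iff _ _).1 hc) hx
      | some minc =>
        rw [norm_eq_sorted hx hr hc]
        rw [norm_perm ((PySem.List.sorted_perm (xs.map (fun p => (p.1 - minr, p.2 - minc))) pvFlat false).map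
              (fun p => (a*p.1 + b*p.2, c*p.1 + d*p.2)))]
        have key : (xs.map (fun p => (p.1 - minr, p.2 - minc))).map
              (fun p => (a*p.1 + b*p.2, c*p.1 + d*p.2))
            = (xs.map (fun p => (a*p.1 + b*p.2, c*p.1 + d*p.2))).map
              (fun p => (p.1 + (-(a*minr + b*minc)), p.2 + (-(c*minr + d*minc)))) := by
          simp only [List.map_map]
          apply List.map_congr_left
          intro p _
          simp only [Function.comp]
          rw [Prod.mk.injEq]
          constructor <;> ring
        rw [key, norm_translate]

theorem norm_map_rot_norm (xs : List (Int × Int)) :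
    normalize_cells ((normalize_cells xs).map (fun p => (p.2, -p.1)))
      = normalize_cells (xs.map (fun p => (p.2, -p.1))) := by
  have e : (fun p : Int × Int => (p.2, -p.1)) = (fun p : Int × Int => (0*p.1 + 1*p.2, (-1)*p.1 + 0*p.2)) := by
    funext p; simp
  rw [e]
  exact norm_map_norm 0 1 (-1) 0 xs

theorem norm_map_flip_norm (xs : List (Int × Int)) :
    normalize_cells ((normalize_cells xs).map (fun p => (p.1, -p.2)))
      = normalize_cells (xs.map (fun p => (p.1, -p.2))) := by
  have e : (fun p : Int × Int => (p.1, -p.2)) = (fun p : Int × Int => (1*p.1 + 0*p.2, 0*p.1 + (-1)*p.2)) := by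
    funext p; simp
  rw [e]
  exact norm_map_norm 1 0 0 (-1) xs

theorem rot_step (xs ys : List (Int × Int))
    (h : xs = normalize_cells ys) :
    rotate_cells xs = normalize_cells (ys.map (fun p => (p.2, -p.1))) := by
  rw [h]
  exact norm_map_rot_norm ys

theorem flip_step (xs ys : List (Int × Int))
    (h : xs = normalize_cells ys) :
    flip_cells xs = normalize_cells (ys.map (fun p => (p.1, -p.2))) := by
  rw [h]
  exact norm_map_flip_norm ys

-- ---- B-side lemmas ----

theorem pvFlat_lt_iff (p q : Int × Int) :
    pvFlat p < pvFlat q ↔ p.1 < q.1 ∨ (p.1 = q.1 ∧ p.2 < q.2) := by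
  have h0 : ¬ (([] : List Int) < []) := List.not_lt_nil []
  simp [pvFlat, List.cons_lt_cons_iff]


theorem pltC_iff (p q : Int × Int) : pltC p q = true ↔ pvFlat p < pvFlat q := by
  simp [pltC, pvFlat_lt_iff]

theorem insCell_eq (p : Int × Int) (l : List (Int × Int)) :
    insCell p l = PySem.List.insertBy (fun a b => decide (pvFlat a < pvFlat b)) p l := by
  induction l with
  | nil => simp [insCell, PySem.List.insertBy]
  | cons q t ih =>
      by_cases h : pvFlat p < pvFlat q
      · have hb : pltC p q = true := (pltC_iff p q).2 h
        simp [insCell, PySem.List.insertBy, hb, h]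
      · have hb : pltC p q = false := by
          rw [Bool.eq_false_iff]; intro hc; exact h ((pltC_iff p q).1 hc)
        simp [insCell, PySem.List.insertBy, hb, h, ih]

theorem pvFlatL_cons (p : Int × Int) (t : List (Int × Int)) :
    pvFlatL (p :: t) = p.1 :: p.2 :: pvFlatL t := by
  simp [pvFlatL, pvFlat]

theorem pltO_iff : ∀ (a b : List (Int × Int)), pltO a b = true ↔ pvFlatL a < pvFlatL b := by
  intro a
  induction a with
  | nil =>
      intro b
      cases b with
      | nil => simp [pltO, pvFlatL]
      | cons q u => simp [pltO, pvFlatL, pvFlat, List.nil_lt_cons]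
  | cons p t ih =>
      intro b
      cases b with
      | nil => simp [pltO, pvFlatL, pvFlat, List.not_lt_nil]
      | cons q u =>
          rw [pvFlatL_cons, pvFlatL_cons]
          simp only [pltO, Bool.or_eq_true, Bool.and_eq_true, beq_iff_eq,
            List.cons_lt_cons_iff, pltC_iff, pvFlat_lt_iff, ih u, Prod.ext_iff]
          tauto

-- the strict order on orientations used by the sorted-unique list
def pvR (a b : List (Int × Int)) : Prop := pvFlatL a < pvFlatL b

theorem pvR_of_not (o x : List (Int × Int)) (hne : o ≠ x) (hnlt : ¬ pvR o x) : pvR x o := by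
  rcases lt_trichotomy (pvFlatL x) (pvFlatL o) with h | h | h
  · exact h
  · exact absurd (pvFlatL_inj h.symm) hne
  · exact absurd h hnlt

theorem addOri_mem (o : List (Int × Int)) :
    ∀ (l : List (List (Int × Int))) (y : List (Int × Int)),
      y ∈ addOri o l ↔ y = o ∨ y ∈ l := by
  intro l
  induction l with
  | nil => intro y; simp [addOri]
  | cons x t ih =>
      intro y
      unfold addOri
      split_ifs with h1 h2
      · subst h1; simp
      · simp
      · simp [ih y]; tauto

theorem addOri_pairwise (o : List (Int × Int)) :
    ∀ (l : List (List (Int × Int))), l.Pairwise pvR → (addOri o l).Pairwise pvR := by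
  intro l
  induction l with
  | nil => intro _; simp [addOri]
  | cons x t ih =>
      intro h
      rw [List.pairwise_cons] at h
      obtain ⟨hx, ht⟩ := h
      unfold addOri
      split_ifs with h1 h2
      · exact List.pairwise_cons.mpr ⟨hx, ht⟩
      · have hox : pvR o x := (pltO_iff o x).1 h2
        refine List.pairwise_cons.mpr ⟨?_, List.pairwise_cons.mpr ⟨hx, ht⟩⟩
        intro y hy
        rcases List.mem_cons.1 hy with hy | hy
        · exact hy ▸ hox
        · exact lt_trans hox (hx y hy)
      · have hxo : pvR x o := pvR_of_not o x h1 (fun hlt => h2 ((pltO_iff o x).2 hlt))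
        refine List.pairwise_cons.mpr ⟨?_, ih ht⟩
        intro y hy
        rcases (addOri_mem o t y).1 hy with hy | hy
        · exact hy ▸ hxo
        · exact hx y hy

theorem pairwise_pvR_nodup (l : List (List (Int × Int))) (h : l.Pairwise pvR) : l.Nodup :=
  h.imp (fun hab => fun he => absurd (he ▸ hab) (lt_irrefl _))

theorem foldl_addOri_mem (g : ((Int × Int) → (Int × Int)) → List (Int × Int)) :
    ∀ (vs : List ((Int × Int) → (Int × Int))) (acc : List (List (Int × Int))) (y : List (Int × Int)),
      y ∈ vs.foldl (fun out m => addOri (g m) out) acc ↔ y ∈ acc ∨ ∃ m ∈ vs, y = g m := by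
  intro vs
  induction vs with
  | nil => intro acc y; simp
  | cons v t ih =>
      intro acc y
      rw [List.foldl_cons, ih (addOri (g v) acc) y, addOri_mem]
      simp
      tauto

theorem foldl_addOri_pairwise (g : ((Int × Int) → (Int × Int)) → List (Int × Int)) :
    ∀ (vs : List ((Int × Int) → (Int × Int))) (acc : List (List (Int × Int))),
      acc.Pairwise pvR → (vs.foldl (fun out m => addOri (g m) out) acc).Pairwise pvR := by
  intro vs
  induction vs with
  | nil => intro acc h; exact h
  | cons v t ih =>
      intro acc h
      rw [List.foldl_cons]
      exact ih _ (addOri_pairwise (g v) acc h)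

theorem if_lt_eq_min (a b : Int) : (if b < a then b else a) = min a b := by
  rcases lt_or_ge b a with h | h
  · rw [if_pos h, min_eq_right h.le]
  · rw [if_neg (not_lt.mpr h), min_eq_left h]

theorem foldl_insCell_eq_sorted (l : List (Int × Int)) (u v : Int) :
    l.foldl (fun srt p => insCell (p.1 - u, p.2 - v) srt) []
      = PySem.List.sorted (l.map (fun p => (p.1 - u, p.2 - v))) pvFlat := by
  rw [PySem.List.sorted_eq_foldl_insertBy, List.foldl_map]
  exact PySem.List.foldl_congr_mem _ _ _ _ (fun acc x _ => insCell_eq _ acc)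

theorem normB_eq (cells : List (Int × Int)) : normB cells = normalize_cells cells := by
  cases cells with
  | nil => rfl
  | cons p0 rest =>
      obtain ⟨r0, c0⟩ := p0
      have hm : rest.foldl
          (fun (m : Int × Int) p =>
            (if p.1 < m.1 then p.1 else m.1, if p.2 < m.2 then p.2 else m.2)) (r0, c0)
          = ((rest.map (fun p : Int × Int => p.1)).foldl min r0,
             (rest.map (fun p : Int × Int => p.2)).foldl min c0) := by
        rw [PySem.List.foldl_prod_mk (f := fun (m : Int) (p : Int × Int) => if p.1 < m then p.1 else m)
              (g := fun (m : Int) (p : Int × Int) => if p.2 < m then p.2 else m)]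
        rw [List.foldl_map, List.foldl_map]
        refine Prod.ext ?_ ?_
        · exact PySem.List.foldl_congr_mem _ _ _ _ (fun acc x _ => if_lt_eq_min acc x.1)
        · exact PySem.List.foldl_congr_mem _ _ _ _ (fun acc x _ => if_lt_eq_min acc x.2)
      have hr : PySem.List.min? (((r0, c0) :: rest).map (fun p => p.1)) (fun x => x)
          = some ((rest.map (fun p : Int × Int => p.1)).foldl min r0) := by
        rw [List.map_cons, PySem.List.min?_id_cons]
      have hc : PySem.List.min? (((r0, c0) :: rest).map (fun p => p.2)) (fun x => x)
          = some ((rest.map (fun p : Int × Int => p.2)).foldl min c0) := by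
        rw [List.map_cons, PySem.List.min?_id_cons]
      rw [norm_eq_sorted (by simp) hr hc]
      simp only [normB]
      rw [hm]
      dsimp only
      exact foldl_insCell_eq_sorted _ _ _

theorem all_orientations_eq (cells : List (Int × Int)) :
    all_orientations cells = all_orientations_alt cells := by
  have hrange : PySem.List.pyRange 0 4 1 = [0, 1, 2, 3] := by decide
  have h1 : rotate_cells (normalize_cells cells)
      = normalize_cells (cells.map (fun p => (p.2, -p.1))) :=
    rot_step _ _ rfl
  have h2 : rotate_cells (normalize_cells (cells.map (fun p => (p.2, -p.1))))
      = normalize_cells (cells.map (fun p => (-p.1, -p.2))) := by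
    rw [rot_step _ _ rfl, List.map_map]
    exact congrArg normalize_cells (List.map_congr_left (fun p _ => by simp [Function.comp]))
  have h3 : rotate_cells (normalize_cells (cells.map (fun p => (-p.1, -p.2))))
      = normalize_cells (cells.map (fun p => (-p.2, p.1))) := by
    rw [rot_step _ _ rfl, List.map_map]
    exact congrArg normalize_cells (List.map_congr_left (fun p _ => by simp [Function.comp]))
  have h4 : rotate_cells (normalize_cells (cells.map (fun p => (-p.2, p.1))))
      = normalize_cells (cells.map (fun p => (p.1, p.2))) := by
    rw [rot_step _ _ rfl, List.map_map]
    exact congrArg normalize_cells (List.map_congr_left (fun p _ => by simp [Function.comp]))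
  have f1 : flip_cells (normalize_cells (cells.map (fun p => (p.2, -p.1))))
      = normalize_cells (cells.map (fun p => (p.2, p.1))) := by
    rw [flip_step _ _ rfl, List.map_map]
    exact congrArg normalize_cells (List.map_congr_left (fun p _ => by simp [Function.comp]))
  have f2 : flip_cells (normalize_cells (cells.map (fun p => (-p.1, -p.2))))
      = normalize_cells (cells.map (fun p => (-p.1, p.2))) := by
    rw [flip_step _ _ rfl, List.map_map]
    exact congrArg normalize_cells (List.map_congr_left (fun p _ => by simp [Function.comp]))
  have f3 : flip_cells (normalize_cells (cells.map (fun p => (-p.2, p.1))))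
      = normalize_cells (cells.map (fun p => (-p.2, -p.1))) := by
    rw [flip_step _ _ rfl, List.map_map]
    exact congrArg normalize_cells (List.map_congr_left (fun p _ => by simp [Function.comp]))
  have f4 : flip_cells (normalize_cells (cells.map (fun p => (p.1, p.2))))
      = normalize_cells (cells.map (fun p => (p.1, -p.2))) := by
    rw [flip_step _ _ rfl, List.map_map]
    exact congrArg normalize_cells (List.map_congr_left (fun p _ => by simp [Function.comp]))
  unfold all_orientations all_orientations_alt
  rw [hrange]
  simp only [List.foldl_cons, List.foldl_nil]
  rw [h1, f1, h2, f2, h3, f3, h4, f4]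
  have hpair := foldl_addOri_pairwise (fun m => normB (cells.map m)) pvMaps [] List.Pairwise.nil
  have e : (fun (a b : List Int) => a.decidableLT b) = (LinearOrder.toDecidableLT (α := List Int)) := by
    funext a b; exact Subsingleton.elim _ _
  rw [e]
  refine PySem.List.sorted_eq_of_perm_of_pairwise_lt _ _ pvFlatL ?_ (hpair.imp (fun h => h))
  apply (List.perm_ext_iff_of_nodup (pairwise_pvR_nodup _ hpair)
    (PySem.Set.nodup_add _ _ (PySem.Set.nodup_add _ _ (PySem.Set.nodup_add _ _
      (PySem.Set.nodup_add _ _ (PySem.Set.nodup_add _ _ (PySem.Set.nodup_add _ _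
      (PySem.Set.nodup_add _ _ (PySem.Set.nodup_add _ _ List.nodup_nil))))))))).2
  intro y
  rw [foldl_addOri_mem]
  simp [pvMaps, normB_eq, PySem.Set.mem_add]
  tauto

-- ===== VERDICT (by name: the statement is the Claim_ definition above) =====
theorem all_orientations_spec : Claim_equal_all_orientations := by
  intro cells _
  unfold Spec_all_orientations
  exact all_orientations_eq cells
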